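-- pv_equiv track=rewrite | github.com/SakibAkbar281/predator_prey_multi_agent_RL | version_2/utils.py | is_sufficiently_different
-- ===== SOURCE A (Python) =====
-- def is_sufficiently_different(angles, threshold=85):
--     """
--     Check if all angles in the list are at least 'threshold' degrees apart from each other.
--
--     :param angles: List of angles (in degrees).
--     :param threshold: Minimum difference in degrees required between any two angles.
--     :return: True if all angles are sufficiently different, False otherwise.
--     """
--     for i in range(len(angles)):
--         for j in range(i + 1, len(angles)):
--             angle_diff = abs(angles[i] - angles[j])
--             # Adjust for angles crossing the 360-degree line
--             angle_diff = min(angle_diff, 360 - angle_diff)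
--             if angle_diff < threshold:
--                 return False
--     return True
-- ===== SOURCE B (Python) =====
-- def is_sufficiently_different(angles, threshold=85):
--     """Sort once and check only the extremes: the smallest circular-style
--     difference over all pairs is realised either by an adjacent gap in the
--     sorted order (the |a-b| side of the min) or by the overall span
--     (the 360-|a-b| side)."""
--     s = sorted(angles)
--     if len(s) < 2:
--         return True
--     if 360 - (s[-1] - s[0]) < threshold:
--         return False
--     for a, b in zip(s, s[1:]):
--         if b - a < threshold:
--             return False
--     return True
-- ===== Notes on version B (the rewrite author's own statement) =====
-- stated objective: alternative
-- what changed: Replaced the all-pairs nested-loop scan by sorting once and checking only adjacent gaps plus the overall span, which realise the extremal pairwise differences; on typical inputs A's early exit makes it as fast, so no speed is claimed.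
import Mathlib
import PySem

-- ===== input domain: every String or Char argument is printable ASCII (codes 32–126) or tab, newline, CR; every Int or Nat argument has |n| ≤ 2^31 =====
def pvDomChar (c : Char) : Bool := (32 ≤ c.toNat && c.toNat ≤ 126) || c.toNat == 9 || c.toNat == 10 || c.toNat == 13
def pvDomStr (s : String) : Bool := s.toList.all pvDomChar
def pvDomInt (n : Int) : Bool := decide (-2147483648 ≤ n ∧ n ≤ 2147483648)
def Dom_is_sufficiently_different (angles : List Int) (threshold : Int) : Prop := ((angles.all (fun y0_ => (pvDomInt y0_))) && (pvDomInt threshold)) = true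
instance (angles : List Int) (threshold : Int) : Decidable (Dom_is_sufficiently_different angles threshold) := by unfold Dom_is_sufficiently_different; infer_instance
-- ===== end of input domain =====

-- B sorts once and checks only the adjacent gaps and the overall span instead of scanning all pairs.

-- ===== PORT A =====
-- inner loop: for j in range(i + 1, len(angles)): … return False on a close pair
def pvAInner (angles : List Int) (threshold : Int) (i : Int) : List Int → Bool
  | [] => true
  | j :: js =>
    match PySem.List.pyGet? angles i, PySem.List.pyGet? angles j with
    | some ai, some aj =>
      let d := |ai - aj|
      let d2 := min d (360 - d)
      if d2 < threshold then false else pvAInner angles threshold i js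
    | _, _ => true  -- unreachable: i and j come from ranges over valid indices

-- outer loop: for i in range(len(angles))
def pvAOuter (angles : List Int) (threshold : Int) : List Int → Bool
  | [] => true
  | i :: is_ =>
    if pvAInner angles threshold i (PySem.List.pyRange (i + 1) angles.length 1) then
      pvAOuter angles threshold is_
    else false

def is_sufficiently_different (angles : List Int) (threshold : Int) : Bool :=
  pvAOuter angles threshold (PySem.List.pyRange 0 angles.length 1)

-- ===== PORT B =====
-- for a, b in zip(s, s[1:]): return False if b - a < threshold
def pvGapsOK (threshold : Int) : List Int → Bool
  | a :: b :: rest => if b - a < threshold then false else pvGapsOK threshold (b :: rest)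
  | _ => true

def is_sufficiently_different_alt (angles : List Int) (threshold : Int) : Bool :=
  let s := PySem.List.sorted angles (fun x => x) false
  if s.length < 2 then true
  else if 360 - (PySem.List.pyGetD s (-1) 0 - PySem.List.pyGetD s 0 0) < threshold then false
  else pvGapsOK threshold s

-- ===== PRECONDITION & SPEC =====
def Spec_is_sufficiently_different (angles : List Int) (threshold : Int) (out : Bool) : Prop := out = is_sufficiently_different_alt angles threshold
instance (angles : List Int) (threshold : Int) (out : Bool) : Decidable (Spec_is_sufficiently_different angles threshold out) := by unfold Spec_is_sufficiently_different; infer_instance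

-- ===== CLAIM (what is proved, stated in full; the proofs are below) =====
def Claim_equal_is_sufficiently_different : Prop := ∀ (angles : List Int) (threshold : Int), Dom_is_sufficiently_different angles threshold → Spec_is_sufficiently_different angles threshold (is_sufficiently_different angles threshold)

-- ===== LEMMAS AND PROOFS =====

-- the pairwise predicate both programs decide: the circular-style difference is not below threshold
def pvQ (t x y : Int) : Prop := ¬ (min |x - y| (360 - |x - y|) < t)

theorem pvQ_symm (t x y : Int) : pvQ t x y → pvQ t y x := by
  unfold pvQ; rw [abs_sub_comm]; exact id

-- A's inner loop checks pvQ against every index in js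
theorem pvAInner_iff (angles : List Int) (t i : Int) (hi0 : 0 ≤ i)
    (hin : i < (angles.length : Int)) (js : List Int)
    (hjs : ∀ j ∈ js, 0 ≤ j ∧ j < (angles.length : Int)) :
    pvAInner angles t i js = true ↔
      ∀ j ∈ js, pvQ t (angles.getD i.toNat 0) (angles.getD j.toNat 0) := by
  induction js with
  | nil => simp [pvAInner]
  | cons j js ih =>
    obtain ⟨hj0, hjn⟩ := hjs j (by simp)
    have hi : PySem.List.pyGet? angles i = some (angles.getD i.toNat 0) := by
      rw [PySem.List.pyGet?_eq_some_getElem angles hi0 hin, List.getD_eq_getElem]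
    have hj : PySem.List.pyGet? angles j = some (angles.getD j.toNat 0) := by
      rw [PySem.List.pyGet?_eq_some_getElem angles hj0 hjn, List.getD_eq_getElem]
    rw [show pvAInner angles t i (j :: js) =
      (if min |angles.getD i.toNat 0 - angles.getD j.toNat 0|
            (360 - |angles.getD i.toNat 0 - angles.getD j.toNat 0|) < t
        then false else pvAInner angles t i js) from by
          simp [pvAInner, hi, hj]]
    split_ifs with h
    · simp only [false_iff]
      intro hall
      exact hall j (by simp) h
    · rw [ih (fun j hm => hjs j (List.mem_cons_of_mem _ hm))]
      constructor
      · intro hall j' hm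
        rcases List.mem_cons.mp hm with rfl | hm'
        · exact h
        · exact hall j' hm'
      · intro hall j' hm'
        exact hall j' (List.mem_cons_of_mem _ hm')

-- A's outer loop over range(a, n) checks pvQ on every index pair a ≤ i < j < n
theorem pvAOuter_iff (angles : List Int) (t : Int) :
    ∀ (k : Nat) (a : Int), 0 ≤ a → ((angles.length : Int) - a).toNat = k →
      (pvAOuter angles t (PySem.List.pyRange a angles.length 1) = true ↔
        ∀ i j : Int, a ≤ i → i < j → j < (angles.length : Int) →
          pvQ t (angles.getD i.toNat 0) (angles.getD j.toNat 0)) := by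
  intro k
  induction k with
  | zero =>
    intro a ha hk
    rw [PySem.List.pyRange_one_eq_nil (by omega)]
    refine ⟨fun _ i j h1 h2 h3 => absurd h3 (by omega), fun _ => rfl⟩
  | succ k ih =>
    intro a ha hk
    have han : a < (angles.length : Int) := by omega
    rw [PySem.List.pyRange_one_cons han]
    simp only [pvAOuter]
    have hinner := pvAInner_iff angles t a ha han (PySem.List.pyRange (a + 1) angles.length 1)
      (by intro j hj; rw [PySem.List.mem_pyRange_one] at hj; omega)
    have hrec := ih (a + 1) (by omega) (by omega)
    by_cases hI : pvAInner angles t a (PySem.List.pyRange (a + 1) angles.length 1) = true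
    · rw [if_pos hI, hrec]
      rw [hinner] at hI
      constructor
      · intro hall i j h1 h2 h3
        rcases eq_or_lt_of_le h1 with rfl | hlt
        · exact hI j (by rw [PySem.List.mem_pyRange_one]; omega)
        · exact hall i j (by omega) h2 h3
      · intro hall i j h1 h2 h3
        exact hall i j (by omega) h2 h3
    · rw [if_neg hI]
      simp only [Bool.false_eq_true, false_iff]
      intro hall
      apply hI
      rw [hinner]
      intro j hj
      rw [PySem.List.mem_pyRange_one] at hj
      exact hall a j le_rfl (by omega) (by omega)

-- A = true ⟺ every pair of list positions satisfies pvQ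
theorem pvA_iff (angles : List Int) (t : Int) :
    is_sufficiently_different angles t = true ↔ angles.Pairwise (pvQ t) := by
  unfold is_sufficiently_different
  rw [pvAOuter_iff angles t ((angles.length : Int) - 0).toNat 0 le_rfl rfl,
    List.pairwise_iff_getElem]
  constructor
  · intro h i j hi hj hij
    have := h i j (by omega) (by omega) (by omega)
    rwa [List.getD_eq_getElem _ _ (by omega : (i : Int).toNat < angles.length),
      List.getD_eq_getElem _ _ (by omega : (j : Int).toNat < angles.length)] at this
  · intro h i j h1 h2 h3
    have hij : i.toNat < j.toNat := by omega
    have hjn : j.toNat < angles.length := by omega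
    have := h i.toNat j.toNat (by omega) hjn hij
    rwa [List.getD_eq_getElem _ _ (by omega : i.toNat < angles.length),
      List.getD_eq_getElem _ _ hjn]

-- B's zip loop checks exactly the adjacent gaps
theorem pvGapsOK_iff (t : Int) (l : List Int) :
    pvGapsOK t l = true ↔ List.IsChain (fun a b => ¬ (b - a < t)) l := by
  induction l with
  | nil => simp [pvGapsOK]
  | cons a l ih =>
    cases l with
    | nil => simp [pvGapsOK]
    | cons b rest =>
      rw [List.isChain_cons_cons]
      by_cases h : b - a < t
      · simp [pvGapsOK, h]
      · simp only [pvGapsOK, if_neg h]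
        rw [ih]
        tauto

-- monotone access in a (· ≤ ·)-pairwise list
theorem pvMono (l : List Int) (hs : l.Pairwise (· ≤ ·)) (p q : Nat) (hpq : p ≤ q)
    (hq : q < l.length) : l[p]'(by omega) ≤ l[q] := by
  rcases eq_or_lt_of_le hpq with rfl | hlt
  · exact le_refl _
  · exact (List.pairwise_iff_getElem.mp hs) p q (by omega) hq hlt

-- on a sorted list, pairwise pvQ ⟺ span bound + adjacent-gap bound
theorem pvSorted_pairwise_iff (t : Int) (l : List Int) (hs : l.Pairwise (· ≤ ·))
    (hlen : 2 ≤ l.length) :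
    l.Pairwise (pvQ t) ↔
      (¬ (360 - (l[l.length - 1]'(by omega) - l[0]'(by omega)) < t) ∧
        List.IsChain (fun a b => ¬ (b - a < t)) l) := by
  have habs : ∀ x y : Int, x ≤ y → |x - y| = y - x := by
    intro x y h; rw [abs_sub_comm, abs_of_nonneg (by omega)]
  constructor
  · intro h
    refine ⟨?_, ?_⟩
    · have hle : l[0]'(by omega) ≤ l[l.length - 1]'(by omega) :=
        pvMono l hs 0 (l.length - 1) (by omega) (by omega)
      have hq := (List.pairwise_iff_getElem.mp h) 0 (l.length - 1) (by omega) (by omega) (by omega)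
      unfold pvQ at hq
      rw [habs _ _ hle] at hq
      omega
    · rw [List.isChain_iff_getElem]
      intro i hi
      have hle : l[i]'(by omega) ≤ l[i+1] := pvMono l hs i (i+1) (by omega) hi
      have hq := (List.pairwise_iff_getElem.mp h) i (i+1) (by omega) hi (by omega)
      unfold pvQ at hq
      rw [habs _ _ hle] at hq
      omega
  · rintro ⟨hspan, hchain⟩
    rw [List.pairwise_iff_getElem]
    intro i j hi hj hij
    have hle : l[i] ≤ l[j] := pvMono l hs i j (by omega) hj
    have h2 : l[i+1]'(by omega) ≤ l[j] := pvMono l hs (i+1) j (by omega) hj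
    have hgap := (List.isChain_iff_getElem.mp hchain) i (by omega)
    have h3 : l[0]'(by omega) ≤ l[i] := pvMono l hs 0 i (by omega) (by omega)
    have h4 : l[j] ≤ l[l.length - 1]'(by omega) := pvMono l hs j (l.length - 1) (by omega) (by omega)
    unfold pvQ
    rw [habs _ _ hle]
    omega

-- B = true ⟺ the sorted list is pairwise pvQ
theorem pvB_iff (angles : List Int) (t : Int) :
    is_sufficiently_different_alt angles t = true ↔
      (PySem.List.sorted angles (fun x => x) false).Pairwise (pvQ t) := by
  unfold is_sufficiently_different_alt
  set s := PySem.List.sorted angles (fun x => x) false with hsdef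
  have hs : s.Pairwise (· ≤ ·) := PySem.List.sorted_pairwise angles (fun x => x)
  by_cases hlen : s.length < 2
  · rw [if_pos hlen]
    simp only [true_iff]
    match s, hlen with
    | [], _ => exact List.Pairwise.nil
    | [x], _ => exact List.pairwise_singleton _ _
  · rw [if_neg hlen]
    have hlen2 : 2 ≤ s.length := by omega
    have hne : s ≠ [] := by intro h; rw [h] at hlen2; simp at hlen2
    have hlast : PySem.List.pyGetD s (-1) 0 = s[s.length - 1]'(by omega) := by
      rw [PySem.List.pyGetD_neg_one s 0 hne, List.getLast_eq_getElem]
    have hhead : PySem.List.pyGetD s 0 0 = s[0]'(by omega) := by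
      rw [PySem.List.pyGetD_zero, List.getD_eq_getElem _ _ (by omega)]
    rw [hlast, hhead, pvSorted_pairwise_iff t s hs hlen2]
    split_ifs with hspan
    · simp only [false_iff]
      intro h
      exact h.1 hspan
    · rw [pvGapsOK_iff]
      exact ⟨fun h => ⟨hspan, h⟩, fun h => h.2⟩

-- ===== VERDICT (by name: the statement is the Claim_ definition above) =====
theorem is_sufficiently_different_spec : Claim_equal_is_sufficiently_different := by
  intro angles threshold _
  unfold Spec_is_sufficiently_different
  rw [Bool.eq_iff_iff, pvA_iff, pvB_iff]
  constructor
  · intro h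
    exact ((PySem.List.sorted_perm angles (fun x => x) false).pairwise_iff
      (fun {a b} => pvQ_symm threshold a b)).mpr h
  · intro h
    exact ((PySem.List.sorted_perm angles (fun x => x) false).pairwise_iff
      (fun {a b} => pvQ_symm threshold a b)).mp h
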